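-- pv_equiv track=rewrite | github.com/sidmanale643/Akaike-Tech | utils.py | get_summaries_by_sentiment
-- ===== SOURCE A (Python) =====
-- def get_summaries_by_sentiment(articles):
--     pos_sum = []
--     neg_sum = []
--     neutral_sum = []
--
--     for article in articles:
--
--         sentiment = article.get("sentiment", "").lower()
--         title = article.get("title", "No Title")
--         summary = article.get("summary", "No Summary")
--
--         article_text = f'Title: {title}\nSummary: {summary}'
--
--         if sentiment == "positive":
--             pos_sum.append(article_text)
--         elif sentiment == "negative":
--             neg_sum.append(article_text)
--         elif sentiment == "neutral":
--             neutral_sum.append(article_text)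
--
--     pos_sum = "\n\n".join(pos_sum) if pos_sum else "No positive articles available."
--     neg_sum = "\n\n".join(neg_sum) if neg_sum else "No negative articles available."
--     neutral_sum = "\n\n".join(neutral_sum) if neutral_sum else "No neutral articles available."
--
--     return pos_sum , neg_sum , neutral_sum
-- ===== SOURCE B (Python) =====
-- def get_summaries_by_sentiment(articles):
--     def section(kind):
--         texts = [f'Title: {a.get("title", "No Title")}\nSummary: {a.get("summary", "No Summary")}'
--                  for a in articles
--                  if a.get("sentiment", "").lower() == kind]
--         return "\n\n".join(texts) if texts else f"No {kind} articles available."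
--     return section("positive"), section("negative"), section("neutral")
-- ===== Notes on version B (the rewrite author's own statement) =====
-- stated objective: simpler
-- what changed: Replaces the single accumulator loop with the if/elif chain by three independent staged passes: for each sentiment a filtering comprehension selects and formats its articles, and the default message is derived from the sentiment name.
import Mathlib
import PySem

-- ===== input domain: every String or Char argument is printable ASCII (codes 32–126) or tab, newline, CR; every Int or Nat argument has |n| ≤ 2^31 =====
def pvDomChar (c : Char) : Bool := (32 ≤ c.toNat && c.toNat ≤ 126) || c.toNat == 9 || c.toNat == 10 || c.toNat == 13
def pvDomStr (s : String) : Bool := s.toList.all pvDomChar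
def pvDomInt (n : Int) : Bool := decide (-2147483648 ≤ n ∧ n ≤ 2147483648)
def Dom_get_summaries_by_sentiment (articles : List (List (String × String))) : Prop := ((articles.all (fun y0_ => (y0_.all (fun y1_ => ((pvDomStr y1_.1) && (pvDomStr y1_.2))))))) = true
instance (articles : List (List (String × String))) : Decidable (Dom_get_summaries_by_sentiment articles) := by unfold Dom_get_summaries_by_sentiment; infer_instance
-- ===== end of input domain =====

-- B replaces A's single accumulator loop + if/elif chain by three independent staged
-- filtering passes, one per sentiment, with the default message built from the name (simpler).

-- shared primitive: article.get(k, dflt) on the association-list dict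
def pvGet (article : List (String × String)) (k dflt : String) : String :=
  (PySem.Dict.mk article).getD k dflt

-- ===== PORT A =====
def get_summaries_by_sentiment (articles : List (List (String × String))) : String × String × String :=
  let acc := articles.foldl (fun (acc : List String × List String × List String) article =>
    let sentiment := PySem.Str.lower (pvGet article "sentiment" "")
    let title := pvGet article "title" "No Title"
    let summary := pvGet article "summary" "No Summary"
    let article_text := "Title: " ++ title ++ "\nSummary: " ++ summary
    if sentiment == "positive" then (acc.1 ++ [article_text], acc.2.1, acc.2.2)
    else if sentiment == "negative" then (acc.1, acc.2.1 ++ [article_text], acc.2.2)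
    else if sentiment == "neutral" then (acc.1, acc.2.1, acc.2.2 ++ [article_text])
    else acc) ([], [], [])
  ((if acc.1.isEmpty then "No positive articles available." else PySem.Str.join "\n\n" acc.1),
   (if acc.2.1.isEmpty then "No negative articles available." else PySem.Str.join "\n\n" acc.2.1),
   (if acc.2.2.isEmpty then "No neutral articles available." else PySem.Str.join "\n\n" acc.2.2))

-- ===== PORT B =====
def get_summaries_by_sentiment_alt (articles : List (List (String × String))) : String × String × String :=
  let sect := fun (kind : String) =>
    let texts := (articles.filter (fun a => PySem.Str.lower (pvGet a "sentiment" "") == kind)).map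
      (fun a => "Title: " ++ pvGet a "title" "No Title" ++ "\nSummary: " ++ pvGet a "summary" "No Summary")
    if texts.isEmpty then "No " ++ kind ++ " articles available." else PySem.Str.join "\n\n" texts
  (sect "positive", sect "negative", sect "neutral")

-- ===== PRECONDITION & SPEC =====
def Spec_get_summaries_by_sentiment (articles : List (List (String × String))) (out : String × String × String) : Prop := out = get_summaries_by_sentiment_alt articles
instance (articles : List (List (String × String))) (out : String × String × String) : Decidable (Spec_get_summaries_by_sentiment articles out) := by unfold Spec_get_summaries_by_sentiment; infer_instance

-- ===== CLAIM (what is proved, stated in full; the proofs are below) =====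
def Claim_equal_get_summaries_by_sentiment : Prop := ∀ (articles : List (List (String × String))), Dom_get_summaries_by_sentiment articles → Spec_get_summaries_by_sentiment articles (get_summaries_by_sentiment articles)

-- ===== LEMMAS AND PROOFS =====

def pvKey (article : List (String × String)) : String :=
  PySem.Str.lower (pvGet article "sentiment" "")

def pvText (article : List (String × String)) : String :=
  "Title: " ++ pvGet article "title" "No Title" ++ "\nSummary: " ++ pvGet article "summary" "No Summary"

def pvSel (k : String) (articles : List (List (String × String))) : List String :=
  (articles.filter (fun a => pvKey a == k)).map pvText

-- A's per-article step, named so the induction can rewrite it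
def pvStep (acc : List String × List String × List String) (article : List (String × String)) :
    List String × List String × List String :=
  if pvKey article == "positive" then (acc.1 ++ [pvText article], acc.2.1, acc.2.2)
  else if pvKey article == "negative" then (acc.1, acc.2.1 ++ [pvText article], acc.2.2)
  else if pvKey article == "neutral" then (acc.1, acc.2.1, acc.2.2 ++ [pvText article])
  else acc

-- A's fold accumulates the three per-key selections onto the initial accumulators
theorem pvA_fold (articles : List (List (String × String)))
    (p n u : List String) :
    articles.foldl pvStep (p, n, u)
      = (p ++ pvSel "positive" articles, n ++ pvSel "negative" articles, u ++ pvSel "neutral" articles) := by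
  induction articles generalizing p n u with
  | nil => simp [pvSel]
  | cons a t ih =>
    by_cases hp : pvKey a = "positive"
    · rw [List.foldl_cons, show pvStep (p, n, u) a = (p ++ [pvText a], n, u) from by
        simp [pvStep, hp], ih]
      simp [pvSel, hp]
    · by_cases hn : pvKey a = "negative"
      · rw [List.foldl_cons, show pvStep (p, n, u) a = (p, n ++ [pvText a], u) from by
          simp [pvStep, hn], ih]
        simp [pvSel, hn]
      · by_cases hu : pvKey a = "neutral"
        · rw [List.foldl_cons, show pvStep (p, n, u) a = (p, n, u ++ [pvText a]) from by
            simp [pvStep, hu], ih]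
          simp [pvSel, hu]
        · rw [List.foldl_cons, show pvStep (p, n, u) a = (p, n, u) from by
            simp [pvStep, hp, hn, hu], ih]
          simp [pvSel, hp, hn, hu]

-- ===== VERDICT (by name: the statement is the Claim_ definition above) =====
theorem get_summaries_by_sentiment_spec : Claim_equal_get_summaries_by_sentiment := by
  intro articles _
  unfold Spec_get_summaries_by_sentiment get_summaries_by_sentiment get_summaries_by_sentiment_alt
  simp only [show (fun (acc : List String × List String × List String) (article : List (String × String)) =>
      let sentiment := PySem.Str.lower (pvGet article "sentiment" "")
      let title := pvGet article "title" "No Title"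
      let summary := pvGet article "summary" "No Summary"
      let article_text := "Title: " ++ title ++ "\nSummary: " ++ summary
      if sentiment == "positive" then (acc.1 ++ [article_text], acc.2.1, acc.2.2)
      else if sentiment == "negative" then (acc.1, acc.2.1 ++ [article_text], acc.2.2)
      else if sentiment == "neutral" then (acc.1, acc.2.1, acc.2.2 ++ [article_text])
      else acc)
    = pvStep from rfl]
  rw [pvA_fold]
  simp only []
  show _ = _
  have ht : pvText = fun a => "Title: " ++ pvGet a "title" "No Title" ++ "\nSummary: " ++ pvGet a "summary" "No Summary" := rfl
  simp [pvSel, pvKey, ht]
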